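-- pv_equiv track=rewrite | github.com/ddw02141/leetcode | 2021-W33/퍼즐_조각_채우기.py | solution
-- ===== SOURCE A (Python) =====
-- def solution(game_board, table):
--     n = len(game_board)
--     visited = [[False for _ in range(n)] for _ in range(n)]
--     empty_boards = []
--     for i in range(n):
--         for j in range(n):
--             if game_board[i][j] == 0:
--                 one = dfs(i, j, game_board, visited, n, 0, [])
--                 if one:
--                     empty_boards.append(one)
--     visited = [[False for _ in range(n)] for _ in range(n)]
--     puzzles = []
--     for i in range(n):
--         for j in range(n):
--             if table[i][j] == 1:
--                 one = dfs(i, j, table, visited, n, 1, [])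
--                 if one:
--                     puzzles.append(one)
--     answer = 0
--     used_empty_board = [False for _ in range(len(empty_boards))]
--     used_puzzle = [False for _ in range(len(puzzles))]
--     for ei, empty_board in enumerate(empty_boards):
--         for pi, puzzle in enumerate(puzzles):
--             if not used_puzzle[pi] and not used_empty_board[ei]:
--                 rotated_puzzle = puzzle
--                 for _ in range(4):
--                     rotated_puzzle = rotate(rotated_puzzle)
--                     if same(rotated_puzzle, empty_board):
--                         answer += len(puzzle)
--                         used_puzzle[pi] = True
--                         used_empty_board[ei] = True
--                         break
--     return answer
--
-- def dfs(x, y, board, visited, n, target, one):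
--     if visited[x][y]:
--         return
--     visited[x][y] = True
--     one.append((x, y))
--     for newX, newY in [(x + 1, y), (x, y + 1), (x - 1, y), (x, y - 1)]:
--         if 0 <= newX < n and 0 <= newY < n and not visited[newX][newY] and board[newX][newY] == target:
--             dfs(newX, newY, board, visited, n, target, one)
--     return one
--
-- def rotate(p):
--     return [(-y, x) for x, y in p]
--
-- def same(p1, p2):
--     p1.sort()
--     p2.sort()
--     p1 = [(x - p1[0][0], y - p1[0][1]) for x, y in p1]
--     p2 = [(x - p2[0][0], y - p2[0][1]) for x, y in p2]
--     return p1 == p2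
-- ===== SOURCE B (Python) =====
-- # B: same flood-fill component extraction as A, but the pairwise
-- # matching (each empty region tested against every unused puzzle with 4
-- # rotations + sorts) is replaced by canonicalizing every component once and
-- # bucketing counts/sizes per canonical shape in dicts.
-- def solution(game_board, table):
--     n = len(game_board)
--     empties = _components(game_board, 0, n)
--     puzzles = _components(table, 1, n)
--     counts = {}
--     sizes = {}
--     for p in puzzles:
--         k = _canon(p)
--         counts[k] = counts.get(k, 0) + 1
--         sizes[k] = len(p)
--     answer = 0
--     for e in empties:
--         k = _canon(e)
--         if counts.get(k, 0):
--             counts[k] -= 1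
--             answer += sizes[k]
--     return answer
--
--
-- def _components(board, target, n):
--     # identical flood fill to A's (shared helper)
--     visited = [[False for _ in range(n)] for _ in range(n)]
--     comps = []
--     for i in range(n):
--         for j in range(n):
--             if board[i][j] == target:
--                 one = _dfs(i, j, board, visited, n, target, [])
--                 if one:
--                     comps.append(one)
--     return comps
--
--
-- def _dfs(x, y, board, visited, n, target, one):
--     if visited[x][y]:
--         return
--     visited[x][y] = True
--     one.append((x, y))
--     for newX, newY in [(x + 1, y), (x, y + 1), (x - 1, y), (x, y - 1)]:
--         if 0 <= newX < n and 0 <= newY < n and not visited[newX][newY] and board[newX][newY] == target: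
--             _dfs(newX, newY, board, visited, n, target, one)
--     return one
--
--
-- def _canon(p):
--     # smallest (lexicographically) of the 4 sorted, origin-normalized rotations
--     best = None
--     for _ in range(4):
--         p = [(-y, x) for x, y in p]
--         s = sorted(p)
--         x0, y0 = s[0]
--         cand = tuple((x - x0, y - y0) for x, y in s)
--         if best is None or cand < best:
--             best = cand
--     return best
-- ===== Notes on version B (the rewrite author's own statement) =====
-- stated objective: alternative
-- what changed: A matches every empty region against every unused puzzle piece with used-flags, sorting and comparing 4 rotations per pair; B canonicalizes each component once (lexicographic minimum of its 4 sorted, origin-normalized rotations) and buckets counts and sizes per canonical shape in dicts, replacing the nested pairwise scan by per-class counting; the flood-fill component extraction is the identical shared helper.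
import Mathlib
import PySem

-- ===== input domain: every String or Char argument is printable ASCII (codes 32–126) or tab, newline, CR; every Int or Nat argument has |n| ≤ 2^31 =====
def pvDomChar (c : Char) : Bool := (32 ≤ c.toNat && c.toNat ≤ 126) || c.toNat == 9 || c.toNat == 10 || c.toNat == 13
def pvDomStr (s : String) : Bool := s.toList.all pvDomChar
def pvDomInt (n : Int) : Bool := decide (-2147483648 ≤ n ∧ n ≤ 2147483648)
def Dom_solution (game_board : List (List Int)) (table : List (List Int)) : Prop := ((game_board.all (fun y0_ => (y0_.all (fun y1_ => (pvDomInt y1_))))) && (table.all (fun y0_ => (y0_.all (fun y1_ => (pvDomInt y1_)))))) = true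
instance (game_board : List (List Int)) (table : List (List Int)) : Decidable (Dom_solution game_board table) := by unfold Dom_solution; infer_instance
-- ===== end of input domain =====

-- B replaces A's greedy pairwise matching (every empty region tested against every unused
-- puzzle with used-flags, sorting 4 rotations per pair) by canonicalizing each component once
-- and bucketing counts/sizes per canonical shape in a dict (per-class counting instead of the
-- nested scan).  The flood-fill component extraction is the identical helper in both Python
-- sources, so it is defined once below and shared.
-- A's same() also sorts its list arguments in place in Python; every consumer re-sorts before
-- any comparison, so the pure ports below return the same value on every admitted input.

-- ===== PORT A =====
def cellAt (b : List (List Int)) (i j : Int) : Int :=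
  PySem.List.pyGetD (PySem.List.pyGetD b i []) j 0

def vget (v : List (List Bool)) (i j : Int) : Bool :=
  PySem.List.pyGetD (PySem.List.pyGetD v i []) j false

def vset (v : List (List Bool)) (i j : Int) (bv : Bool) : List (List Bool) :=
  PySem.List.pySetD v i (PySem.List.pySetD (PySem.List.pyGetD v i []) j bv)

-- recursion on explicit fuel (n*n+1 at each top-level call, enough since every nested call
-- marks a fresh cell of the n*n board); indexing is exact on Pre_ inputs
def dfs : Nat → Int → Int → List (List Int) → List (List Bool) → Int → Int → List (Int × Int) →
    List (List Bool) × List (Int × Int)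
  | 0, _, _, _, visited, _, _, one => (visited, one)
  | fuel+1, x, y, board, visited, n, target, one =>
    if vget visited x y then (visited, one)
    else
      let visited1 := vset visited x y true
      let one1 := one ++ [(x, y)]
      [(x+1,y),(x,y+1),(x-1,y),(x,y-1)].foldl
        (fun st nb =>
          if (decide (0 ≤ nb.1) && decide (nb.1 < n) && decide (0 ≤ nb.2) && decide (nb.2 < n)
              && !(vget st.1 nb.1 nb.2) && (cellAt board nb.1 nb.2 == target))
          then dfs fuel nb.1 nb.2 board st.1 n target st.2
          else st)
        (visited1, one1)

def collect (board : List (List Int)) (target : Int) (n : Int) : List (List (Int × Int)) :=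
  let visited0 := (PySem.List.pyRange 0 n 1).map (fun _ => (PySem.List.pyRange 0 n 1).map (fun _ => false))
  let fuel := n.toNat * n.toNat + 1
  ((PySem.List.pyRange 0 n 1).foldl (fun st i =>
     (PySem.List.pyRange 0 n 1).foldl (fun st j =>
        if cellAt board i j == target then
          let r := dfs fuel i j board st.1 n target []
          if r.2 ≠ [] then (r.1, st.2 ++ [r.2]) else (r.1, st.2)
        else st) st)
    (visited0, ([] : List (List (Int × Int))))).2

def rotateP (p : List (Int × Int)) : List (Int × Int) := p.map (fun a => (-a.2, a.1))

def psort (p : List (Int × Int)) : List (Int × Int) :=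
  PySem.List.sorted p (fun a => (toLex a : Lex (Int × Int))) false

def normP (p : List (Int × Int)) : List (Int × Int) :=
  match psort p with
  | [] => []
  | h0 :: t => (h0 :: t).map (fun a => (a.1 - h0.1, a.2 - h0.2))

def sameP (p q : List (Int × Int)) : Bool := normP p == normP q

def try4 : Nat → List (Int × Int) → List (Int × Int) → Bool
  | 0, _, _ => false
  | k+1, rp, e => let rp' := rotateP rp; if sameP rp' e then true else try4 k rp' e

def innerStep (e : List (Int × Int)) (ei : Int) (st : Int × List Bool × List Bool)
    (pp : Int × List (Int × Int)) : Int × List Bool × List Bool :=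
  if !(PySem.List.pyGetD st.2.2 pp.1 false) && !(PySem.List.pyGetD st.2.1 ei false) then
    (if try4 4 pp.2 e then
      (st.1 + (pp.2.length : Int), PySem.List.pySetD st.2.1 ei true, PySem.List.pySetD st.2.2 pp.1 true)
    else st)
  else st

def innerLoop (e : List (Int × Int)) (ei : Int) (puzzles : List (List (Int × Int)))
    (st : Int × List Bool × List Bool) : Int × List Bool × List Bool :=
  (PySem.List.enumerate puzzles 0).foldl (innerStep e ei) st

def solution (game_board : List (List Int)) (table : List (List Int)) : Int :=
  let n : Int := game_board.length
  let empty_boards := collect game_board 0 n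
  let puzzles := collect table 1 n
  let used_e := empty_boards.map (fun _ => false)
  let used_p := puzzles.map (fun _ => false)
  ((PySem.List.enumerate empty_boards 0).foldl (fun st ep => innerLoop ep.2 ep.1 puzzles st)
    (0, used_e, used_p)).1

-- ===== PORT B =====
def ltP (a b : Int × Int) : Bool := a.1 < b.1 || (a.1 == b.1 && a.2 < b.2)

def ltKey : List (Int × Int) → List (Int × Int) → Bool
  | [], [] => false
  | [], _ :: _ => true
  | _ :: _, [] => false
  | a :: s, b :: t => if ltP a b then true else if ltP b a then false else ltKey s t

def canonGo : Nat → List (Int × Int) → Option (List (Int × Int)) → List (Int × Int)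
  | 0, _, best => best.getD []
  | k+1, p, best =>
    let p' := rotateP p
    let c := normP p'
    canonGo k p' (match best with
      | none => some c
      | some b => if ltKey c b then some c else some b)

def canon (p : List (Int × Int)) : List (Int × Int) := canonGo 4 p none

def buildCS (puzzles : List (List (Int × Int))) :
    PySem.Dict (List (Int × Int)) Int × PySem.Dict (List (Int × Int)) Int :=
  puzzles.foldl (fun st p =>
      (st.1.insert (canon p) (st.1.getD (canon p) 0 + 1),
       st.2.insert (canon p) ((p.length : Int))))
    (PySem.Dict.empty, PySem.Dict.empty)

def bStep (sizes : PySem.Dict (List (Int × Int)) Int)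
    (st : Int × PySem.Dict (List (Int × Int)) Int) (e : List (Int × Int)) :
    Int × PySem.Dict (List (Int × Int)) Int :=
  let k := canon e
  if st.2.getD k 0 ≠ 0 then (st.1 + sizes.getD k 0, st.2.insert k (st.2.getD k 0 - 1)) else st

def solution_alt (game_board : List (List Int)) (table : List (List Int)) : Int :=
  let n : Int := game_board.length
  let empties := collect game_board 0 n
  let puzzles := collect table 1 n
  let cs := buildCS puzzles
  ((empties.foldl (bStep cs.2) (0, cs.1))).1

-- ===== PRECONDITION & SPEC =====
-- Pre_ excludes exactly the inputs on which the Python A raises IndexError: a row of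
-- game_board shorter than len(game_board), or a table with fewer rows, or a consulted
-- table row shorter than len(game_board).
def Pre_solution (game_board : List (List Int)) (table : List (List Int)) : Prop :=
  (∀ row ∈ game_board, game_board.length ≤ row.length) ∧
  game_board.length ≤ table.length ∧
  (∀ row ∈ table.take game_board.length, game_board.length ≤ row.length)
instance (game_board : List (List Int)) (table : List (List Int)) : Decidable (Pre_solution game_board table) := by
  unfold Pre_solution; infer_instance

def pvWitness_solution : List (List Int) × List (List Int) := ([[0]], [[1]])

def Spec_solution (game_board : List (List Int)) (table : List (List Int)) (out : Int) : Prop :=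
  out = solution_alt game_board table
instance (game_board : List (List Int)) (table : List (List Int)) (out : Int) : Decidable (Spec_solution game_board table out) := by
  unfold Spec_solution; infer_instance

-- ===== CLAIM (what is proved, stated in full; the proofs are below) =====
def Claim_equal_solution : Prop := ∀ (game_board : List (List Int)) (table : List (List Int)), Dom_solution game_board table → Pre_solution game_board table → Spec_solution game_board table (solution game_board table)

-- ===== LEMMAS AND PROOFS =====

theorem ltP_trans {a b c : Int × Int} (h1 : ltP a b = true) (h2 : ltP b c = true) : ltP a c = true := by
  simp only [ltP, Bool.or_eq_true, Bool.and_eq_true, decide_eq_true_eq, beq_iff_eq] at *; omega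
theorem ltP_conn {a b : Int × Int} (h1 : ltP a b = false) (h2 : ltP b a = false) : a = b := by
  simp only [ltP, Bool.or_eq_false_iff, Bool.and_eq_false_iff, decide_eq_false_iff_not, beq_eq_false_iff_ne] at *
  have : a.1 = b.1 ∧ a.2 = b.2 := by omega
  exact Prod.ext this.1 this.2
theorem ltKey_trans : ∀ {a b c : List (Int × Int)}, ltKey a b = true → ltKey b c = true → ltKey a c = true
  | [], [], _ => by intro h; simp [ltKey] at h
  | [], _ :: _, [] => by intro _ h; simp [ltKey] at h
  | [], _ :: _, _ :: _ => by intro _ _; simp [ltKey]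
  | _ :: _, [], _ => by intro h; simp [ltKey] at h
  | _ :: _, _ :: _, [] => by intro _ h; simp [ltKey] at h
  | a :: s, b :: t, c :: w => by
    intro h1 h2
    simp only [ltKey] at h1 h2 ⊢
    split_ifs at h1 with hab hba
    · split_ifs at h2 with hbc hcb
      · simp [ltP_trans hab hbc]
      · have hbc2 : b = c := ltP_conn (by simpa using hbc) (by simpa using hcb)
        subst hbc2; simp [hab]
    · have hab2 : a = b := ltP_conn (by simpa using hab) (by simpa using hba)
      subst hab2
      split_ifs at h2 with hbc hcb
      · simp [hbc]
      · simp only [if_neg hbc, if_neg hcb]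
        exact ltKey_trans h1 h2

theorem ltKey_conn : ∀ {a b : List (Int × Int)}, ltKey a b = false → ltKey b a = false → a = b
  | [], [], _, _ => rfl
  | [], _ :: _, h, _ => by simp [ltKey] at h
  | _ :: _, [], _, h => by simp [ltKey] at h
  | a :: s, b :: t, h1, h2 => by
    simp only [ltKey] at h1 h2
    split_ifs at h1 with hab hba
    · rw [if_pos hba] at h2; exact absurd h2 (by simp)
    · have hab2 : a = b := ltP_conn (by simpa using hab) (by simpa using hba)
      subst hab2
      rw [if_neg hab, if_neg hba] at h2
      exact congrArg (a :: ·) (ltKey_conn h1 h2)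

theorem ltKey_irrefl : ∀ (a : List (Int × Int)), ltKey a a = false
  | [] => rfl
  | a :: s => by
    simp only [ltKey]
    have : ltP a a = false := by simp [ltP]
    simp [this, ltKey_irrefl s]

theorem ltKey_asymm {a b : List (Int × Int)} (h : ltKey a b = true) : ltKey b a = false := by
  by_contra hc
  rw [Bool.not_eq_false] at hc
  have := ltKey_trans h hc
  rw [ltKey_irrefl] at this; exact absurd this (by simp)

theorem ltKey_le_trans {a b c : List (Int × Int)} (h1 : ltKey b a = false) (h2 : ltKey c b = false) :
    ltKey c a = false := by
  by_contra hc
  rw [Bool.not_eq_false] at hc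
  rcases hab : ltKey a b with _ | _
  · rcases hba : ltKey b a with _ | _
    · have : a = b := ltKey_conn hab hba
      subst this; simp_all
    · simp_all
  · have := ltKey_trans hc hab
    simp_all

def m2 (b c : List (Int × Int)) : List (Int × Int) := if ltKey c b then c else b
def rotN : Nat → List (Int × Int) → List (Int × Int)
  | 0, p => p
  | k+1, p => rotateP (rotN k p)

theorem rotN_four (p : List (Int × Int)) : rotN 4 p = p := by
  show rotateP (rotateP (rotateP (rotateP p))) = p
  simp [rotateP, List.map_map, Function.comp_def]

theorem psort_pairwise (p : List (Int × Int)) :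
    (psort p).Pairwise (fun a b => (toLex a : Lex (Int × Int)) ≤ toLex b) :=
  PySem.List.sorted_pairwise p _
theorem psort_perm (p : List (Int × Int)) : (psort p).Perm p :=
  PySem.List.sorted_perm p _ _
theorem lex_antisymm {a b : Int × Int} (h1 : (toLex a : Lex (Int × Int)) ≤ toLex b)
    (h2 : (toLex b : Lex (Int × Int)) ≤ toLex a) : a = b :=
  toLex.injective (le_antisymm h1 h2)
theorem psort_eq_of_perm {p q : List (Int × Int)} (h : p.Perm q) : psort p = psort q := by
  refine List.Perm.eq_of_pairwise (fun a b _ _ h1 h2 => lex_antisymm h1 h2)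
    (psort_pairwise p) (psort_pairwise q) ?_
  exact (psort_perm p).trans (h.trans (psort_perm q).symm)

theorem psort_map_translate (t : Int × Int) (p : List (Int × Int)) :
    psort (p.map (fun a => (a.1 + t.1, a.2 + t.2))) = (psort p).map (fun a => (a.1 + t.1, a.2 + t.2)) := by
  refine List.Perm.eq_of_pairwise (fun a b _ _ h1 h2 => lex_antisymm h1 h2)
    (psort_pairwise _) ?_ ?_
  · refine (psort_pairwise p).map _ (fun a b h => ?_)
    rw [Prod.Lex.le_iff] at h ⊢
    simp only [ofLex_toLex] at h ⊢
    rcases h with h | ⟨h1, h2⟩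
    · exact Or.inl (by omega)
    · exact Or.inr (by constructor <;> omega)
  · exact (psort_perm _).trans ((psort_perm p).map _).symm

theorem length_psort (p : List (Int × Int)) : (psort p).length = p.length :=
  (psort_perm p).length_eq
theorem psort_eq_nil_iff {p : List (Int × Int)} : psort p = [] ↔ p = [] := by
  constructor <;> intro h
  · have := length_psort p; rw [h] at this; exact List.length_eq_zero_iff.mp this.symm
  · subst h; rfl
theorem length_normP (p : List (Int × Int)) : (normP p).length = p.length := by
  unfold normP
  rcases hs : psort p with _ | ⟨h0, t⟩
  · simp [psort_eq_nil_iff.mp hs]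
  · have := length_psort p; rw [hs] at this; simpa using this
theorem normP_perm_congr {p q : List (Int × Int)} (h : p.Perm q) : normP p = normP q := by
  unfold normP; rw [psort_eq_of_perm h]

theorem normP_translate (t : Int × Int) (p : List (Int × Int)) :
    normP (p.map (fun a => (a.1 + t.1, a.2 + t.2))) = normP p := by
  unfold normP
  rw [psort_map_translate]
  rcases hs : psort p with _ | ⟨h0, t0⟩
  · simp
  · simp only [List.map_cons, List.map_map]
    congr 1
    · simp
    · refine List.map_congr_left (fun a _ => ?_)
      simp only [Function.comp_apply, Prod.ext_iff]
      omega

theorem normP_rot_of_norm (s : List (Int × Int)) :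
    normP (rotateP s) = normP (rotateP (normP s)) := by
  rcases hs : psort s with _ | ⟨h0, t0⟩
  · have : s = [] := psort_eq_nil_iff.mp hs
    subst this; rfl
  · -- s ~ map (add h0) (normP s)
    have hperm1 : s.Perm (psort s) := (psort_perm s).symm
    have hnorm : normP s = (psort s).map (fun a => (a.1 - h0.1, a.2 - h0.2)) := by
      unfold normP; rw [hs]
    have hback : (normP s).map (fun a => (a.1 + h0.1, a.2 + h0.2)) = psort s := by
      rw [hnorm, List.map_map]
      refine (List.map_congr_left (fun a _ => ?_)).trans (List.map_id _)
      obtain ⟨x, y⟩ := a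
      simp
    have hperm : s.Perm ((normP s).map (fun a => (a.1 + h0.1, a.2 + h0.2))) := by
      rw [hback]; exact hperm1
    have hrotperm : (rotateP s).Perm (rotateP ((normP s).map (fun a => (a.1 + h0.1, a.2 + h0.2)))) :=
      hperm.map _
    have hcomm : rotateP ((normP s).map (fun a => (a.1 + h0.1, a.2 + h0.2)))
        = (rotateP (normP s)).map (fun a => (a.1 + (-h0.2), a.2 + h0.1)) := by
      unfold rotateP
      rw [List.map_map, List.map_map]
      refine List.map_congr_left (fun a _ => ?_)
      obtain ⟨x, y⟩ := a
      show ((-(y + h0.2) : Int), x + h0.1) = (-y + -h0.2, x + h0.1)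
      simp [Int.add_comm]
    calc normP (rotateP s) = normP (rotateP ((normP s).map (fun a => (a.1 + h0.1, a.2 + h0.2)))) :=
          normP_perm_congr hrotperm
      _ = normP ((rotateP (normP s)).map (fun a => (a.1 + (-h0.2), a.2 + h0.1))) := by rw [hcomm]
      _ = normP (rotateP (normP s)) := normP_translate ((-h0.2, h0.1)) _

theorem normP_rot_congr {a b : List (Int × Int)} (h : normP a = normP b) :
    normP (rotateP a) = normP (rotateP b) := by
  rw [normP_rot_of_norm a, normP_rot_of_norm b, h]
theorem normP_rotN_congr (k : Nat) {a b : List (Int × Int)} (h : normP a = normP b) :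
    normP (rotN k a) = normP (rotN k b) := by
  induction k with
  | zero => exact h
  | succ k ih => exact normP_rot_congr ih
theorem rotN_add (j k : Nat) (p : List (Int × Int)) : rotN (j + k) p = rotN j (rotN k p) := by
  induction j with
  | zero => simp [rotN]
  | succ j ih => rw [Nat.succ_add]; simp only [rotN]; rw [ih]
theorem rotN_four_add (k : Nat) (p : List (Int × Int)) : rotN (k + 4) p = rotN k p := by
  rw [Nat.add_comm, rotN_add, rotN_four]  -- rotN (4+k) hmm

theorem m2_mem (b c : List (Int × Int)) : m2 b c = b ∨ m2 b c = c := by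
  unfold m2; split <;> simp
theorem m2_not_lt_right (b c : List (Int × Int)) : ltKey c (m2 b c) = false := by
  unfold m2; split
  · exact ltKey_irrefl c
  · next h => simpa using h
theorem m2_not_lt_left (b c : List (Int × Int)) : ltKey b (m2 b c) = false := by
  unfold m2; split
  · next h => exact ltKey_asymm h
  · exact ltKey_irrefl b
theorem m2_not_lt_of (x b c : List (Int × Int)) (h : ltKey x b = false) : ltKey x (m2 b c) = false := by
  unfold m2; split
  · next hcb => exact ltKey_le_trans (ltKey_asymm hcb) h   -- hmm check
  · exact h

theorem canonGo_succ_some (k : Nat) (p : List (Int × Int)) (b : List (Int × Int)) :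
    canonGo (k+1) p (some b) = canonGo k (rotateP p) (some (m2 b (normP (rotateP p)))) := by
  simp only [canonGo, m2]
  congr 1
  split <;> rfl

theorem canon_eq_m2 (p : List (Int × Int)) :
    canon p = m2 (m2 (m2 (normP (rotN 1 p)) (normP (rotN 2 p))) (normP (rotN 3 p))) (normP (rotN 4 p)) := by
  show canonGo 4 p none = _
  have h1 : canonGo 4 p none = canonGo 3 (rotateP p) (some (normP (rotateP p))) := by
    simp only [canonGo]
  rw [h1, canonGo_succ_some, canonGo_succ_some, canonGo_succ_some]
  rfl

def cands (p : List (Int × Int)) : List (List (Int × Int)) :=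
  [normP (rotN 1 p), normP (rotN 2 p), normP (rotN 3 p), normP (rotN 4 p)]

theorem canon_mem (p : List (Int × Int)) : canon p ∈ cands p := by
  rw [canon_eq_m2]; unfold cands
  rcases m2_mem (m2 (m2 (normP (rotN 1 p)) (normP (rotN 2 p))) (normP (rotN 3 p))) (normP (rotN 4 p)) with h | h <;> rw [h]
  · rcases m2_mem (m2 (normP (rotN 1 p)) (normP (rotN 2 p))) (normP (rotN 3 p)) with h2 | h2 <;> rw [h2]
    · rcases m2_mem (normP (rotN 1 p)) (normP (rotN 2 p)) with h3 | h3 <;> rw [h3] <;> simp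
    · simp
  · simp

theorem canon_min (p : List (Int × Int)) : ∀ c ∈ cands p, ltKey c (canon p) = false := by
  intro c hc
  rw [canon_eq_m2]
  simp only [cands, List.mem_cons, List.not_mem_nil, or_false] at hc
  rcases hc with rfl | rfl | rfl | rfl
  · exact m2_not_lt_of _ _ _ (m2_not_lt_of _ _ _ (m2_not_lt_left _ _))
  · exact m2_not_lt_of _ _ _ (m2_not_lt_of _ _ _ (m2_not_lt_right _ _))
  · exact m2_not_lt_of _ _ _ (m2_not_lt_right _ _)
  · exact m2_not_lt_right _ _

theorem mem_cands {c p : List (Int × Int)} :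
    c ∈ cands p ↔ ∃ k, 1 ≤ k ∧ k ≤ 4 ∧ c = normP (rotN k p) := by
  simp only [cands, List.mem_cons, List.not_mem_nil, or_false]
  constructor
  · rintro (h | h | h | h)
    exacts [⟨1, by omega, by omega, h⟩, ⟨2, by omega, by omega, h⟩, ⟨3, by omega, by omega, h⟩,
      ⟨4, by omega, by omega, h⟩]
  · rintro ⟨k, h1, h4, rfl⟩
    interval_cases k <;> simp

theorem normP_rotN_mem_cands (p : List (Int × Int)) (m : Nat) (h1 : 1 ≤ m) (h8 : m ≤ 8) :
    normP (rotN m p) ∈ cands p := by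
  rcases Nat.lt_or_ge m 5 with h | h
  · exact mem_cands.mpr ⟨m, h1, by omega, rfl⟩
  · have : m = (m - 4) + 4 := by omega
    rw [this, rotN_four_add]
    exact mem_cands.mpr ⟨m - 4, by omega, by omega, rfl⟩

theorem canon_eq_iff {p e : List (Int × Int)} :
    canon p = canon e ↔ ∃ k, 1 ≤ k ∧ k ≤ 4 ∧ normP (rotN k p) = normP e := by
  constructor
  · intro h
    obtain ⟨i, hi1, hi4, hip⟩ := mem_cands.mp (canon_mem p)
    obtain ⟨j, hj1, hj4, hje⟩ := mem_cands.mp (canon_mem e)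
    have hij : normP (rotN i p) = normP (rotN j e) := by rw [← hip, ← hje, h]
    have h4 : normP (rotN (4 - j) (rotN i p)) = normP (rotN (4 - j) (rotN j e)) :=
      normP_rotN_congr _ hij
    rw [← rotN_add, ← rotN_add] at h4
    have hj : (4 - j) + j = 4 := by omega
    rw [hj, rotN_four] at h4
    rcases Nat.lt_or_ge ((4 - j) + i) 5 with hlt | hge
    · exact ⟨(4 - j) + i, by omega, by omega, h4⟩
    · refine ⟨(4 - j) + i - 4, by omega, by omega, ?_⟩
      have : (4 - j) + i = ((4 - j) + i - 4) + 4 := by omega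
      rw [this, rotN_four_add] at h4
      exact h4
  · rintro ⟨k, hk1, hk4, hk⟩
    -- cands e ⊆ cands p and cands p ⊆ cands e
    have sub1 : ∀ c ∈ cands e, c ∈ cands p := by
      intro c hc
      obtain ⟨j, hj1, hj4, rfl⟩ := mem_cands.mp hc
      have : normP (rotN j (rotN k p)) = normP (rotN j e) := normP_rotN_congr _ hk
      rw [← rotN_add] at this
      rw [← this]
      exact normP_rotN_mem_cands p (j + k) (by omega) (by omega)
    have hk' : normP p = normP (rotN (4 - k) e) := by
      have h4 : normP (rotN (4 - k) (rotN k p)) = normP (rotN (4 - k) e) :=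
        normP_rotN_congr _ hk
      rw [← rotN_add] at h4
      have : (4 - k) + k = 4 := by omega
      rw [this, rotN_four] at h4
      exact h4
    have sub2 : ∀ c ∈ cands p, c ∈ cands e := by
      intro c hc
      obtain ⟨j, hj1, hj4, rfl⟩ := mem_cands.mp hc
      have : normP (rotN j p) = normP (rotN j (rotN (4 - k) e)) := normP_rotN_congr _ hk'
      rw [← rotN_add] at this
      rw [this]
      exact normP_rotN_mem_cands e (j + (4 - k)) (by omega) (by omega)
    have h1 : ltKey (canon p) (canon e) = false :=
      canon_min e (canon p) (sub2 _ (canon_mem p))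
    have h2 : ltKey (canon e) (canon p) = false :=
      canon_min p (canon e) (sub1 _ (canon_mem e))
    exact ltKey_conn h1 h2

theorem try4_succ (k : Nat) (rp e : List (Int × Int)) :
    try4 (k+1) rp e = (sameP (rotateP rp) e || try4 k (rotateP rp) e) := by
  simp only [try4]
  cases sameP (rotateP rp) e <;> simp

theorem try4_iff {p e : List (Int × Int)} :
    try4 4 p e = true ↔ ∃ k, 1 ≤ k ∧ k ≤ 4 ∧ normP (rotN k p) = normP e := by
  rw [try4_succ, try4_succ, try4_succ, try4_succ]
  show (sameP (rotN 1 p) e || (sameP (rotN 2 p) e || (sameP (rotN 3 p) e || (sameP (rotN 4 p) e || try4 0 (rotN 4 p) e)))) = true ↔ _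
  simp only [try4, sameP, Bool.or_false, Bool.or_eq_true, beq_iff_eq]
  constructor
  · rintro (h | h | h | h)
    exacts [⟨1, by omega, by omega, h⟩, ⟨2, by omega, by omega, h⟩, ⟨3, by omega, by omega, h⟩,
      ⟨4, by omega, by omega, h⟩]
  · rintro ⟨k, h1, h4, hk⟩
    interval_cases k
    exacts [Or.inl hk, Or.inr (Or.inl hk), Or.inr (Or.inr (Or.inl hk)), Or.inr (Or.inr (Or.inr hk))]

theorem try4_eq_canon (p e : List (Int × Int)) : try4 4 p e = (canon p == canon e) := by
  rw [Bool.eq_iff_iff, try4_iff, beq_iff_eq, canon_eq_iff]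

theorem length_rotN (k : Nat) (p : List (Int × Int)) : (rotN k p).length = p.length := by
  induction k with
  | zero => rfl
  | succ k ih => simp [rotN, rotateP, ih]

theorem canon_length {p q : List (Int × Int)} (h : canon p = canon q) : p.length = q.length := by
  have hp : (canon p).length = p.length := by
    obtain ⟨k, _, _, hk⟩ := mem_cands.mp (canon_mem p)
    rw [hk, length_normP, length_rotN]
  have hq : (canon q).length = q.length := by
    obtain ⟨k, _, _, hk⟩ := mem_cands.mp (canon_mem q)
    rw [hk, length_normP, length_rotN]
  rw [← hp, ← hq, h]

def pick (e : List (Int × Int)) : List (List (Int × Int)) → List Bool → Option (Int × List Bool)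
  | [], _ => none
  | _ :: _, [] => none
  | p :: P, b :: u =>
    if !b && try4 4 p e then some ((p.length : Int), true :: u)
    else (pick e P u).map (fun r => (r.1, b :: r.2))

def cnt (P : List (List (Int × Int))) (u : List Bool) (k : List (Int × Int)) : Nat :=
  (P.zip u).countP (fun q => !q.2 && (canon q.1 == k))

theorem pick_none_iff (e : List (Int × Int)) :
    ∀ (P : List (List (Int × Int))) (u : List Bool), u.length = P.length →
    (pick e P u = none ↔ cnt P u (canon e) = 0)
  | [], u, _ => by simp [pick, cnt]
  | p :: P, [], h => by simp at h
  | p :: P, b :: u, h => by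
    simp only [pick, cnt, List.zip_cons_cons, List.countP_cons]
    rw [try4_eq_canon]
    by_cases hb : (!b && (canon p == canon e)) = true
    · rw [if_pos hb]
      simp [hb]
    · rw [if_neg hb]
      rw [Bool.not_eq_true] at hb
      have := pick_none_iff e P u (by simpa using h)
      simp only [cnt] at this
      simp [this, hb]

theorem pick_some (e : List (Int × Int)) :
    ∀ (P : List (List (Int × Int))) (u : List Bool) (len : Int) (u' : List Bool),
    u.length = P.length →
    pick e P u = some (len, u') →
    u'.length = u.length ∧
    (∃ p ∈ P, canon p = canon e ∧ len = (p.length : Int)) ∧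
    cnt P u (canon e) = cnt P u' (canon e) + 1 ∧
    (∀ k, k ≠ canon e → cnt P u' k = cnt P u k)
  | [], u, len, u', _, h => by simp [pick] at h
  | p :: P, [], len, u', h, _ => by simp at h
  | p :: P, b :: u, len, u', h, hp => by
    simp only [pick] at hp
    by_cases hb : (!b && try4 4 p e) = true
    · rw [if_pos hb] at hp
      simp only [Option.some.injEq, Prod.mk.injEq] at hp
      obtain ⟨rfl, rfl⟩ := hp
      rw [try4_eq_canon] at hb
      simp only [Bool.and_eq_true, Bool.not_eq_true', beq_iff_eq] at hb
      obtain ⟨rfl, hpe⟩ := hb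
      refine ⟨by simp, ⟨p, by simp, hpe, rfl⟩, ?_, ?_⟩
      · simp only [cnt, List.zip_cons_cons, List.countP_cons, hpe]
        simp
      · intro k hk
        simp only [cnt, List.zip_cons_cons, List.countP_cons]
        have : (canon p == k) = false := by simp [hpe, (Ne.symm hk)]
        simp [this]
    · rw [if_neg hb] at hp
      rcases hrec : pick e P u with _ | ⟨len2, u2⟩
      · rw [hrec] at hp; simp at hp
      · rw [hrec] at hp
        simp only [Option.map_some, Option.some.injEq, Prod.mk.injEq] at hp
        obtain ⟨rfl, rfl⟩ := hp
        obtain ⟨ih1, ⟨q, hq, hqe, hlen⟩, ih3, ih4⟩ :=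
          pick_some e P u len2 u2 (by simpa using h) hrec
        refine ⟨by simp [ih1], ⟨q, by simp [hq], hqe, hlen⟩, ?_, ?_⟩
        · simp only [cnt, List.zip_cons_cons, List.countP_cons]
          simp only [cnt] at ih3
          omega
        · intro k hk
          simp only [cnt, List.zip_cons_cons, List.countP_cons]
          have := ih4 k hk
          simp only [cnt] at this
          omega

theorem inner_noop (e : List (Int × Int)) (ei : Int) :
    ∀ (L : List (Int × List (Int × Int))) (st : Int × List Bool × List Bool),
    PySem.List.pyGetD st.2.1 ei false = true →
    L.foldl (innerStep e ei) st = st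
  | [], st, _ => rfl
  | pp :: L, st, h => by
    have hstep : innerStep e ei st pp = st := by
      unfold innerStep
      rw [h]
      simp
    rw [List.foldl_cons, hstep]
    exact inner_noop e ei L st h

theorem getD_append_cons (pref : List Bool) (b : Bool) (rest : List Bool) (d : Bool) :
    (pref ++ b :: rest).getD pref.length d = b := by
  rw [List.getD, List.getElem?_append_right (Nat.le_refl _)]
  simp

theorem set_append_cons (pref : List Bool) (b v : Bool) (rest : List Bool) :
    (pref ++ b :: rest).set pref.length v = pref ++ v :: rest := by
  rw [List.set_append]
  simp

theorem getD_set_self (l : List Bool) (n : Nat) (v d : Bool) (h : n < l.length) :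
    (l.set n v).getD n d = v := by
  rw [List.getD, List.getElem?_set_self (by simpa using h)]
  rfl

theorem inner_char (e : List (Int × Int)) (ei : Nat) :
    ∀ (P' : List (List (Int × Int))) (suf : List Bool) (s : Nat) (pref : List Bool)
      (ans : Int) (ue : List Bool),
    pref.length = s → suf.length = P'.length → ei < ue.length → ue.getD ei false = false →
    (PySem.List.enumerate P' (s : Int)).foldl (innerStep e (ei : Int)) (ans, ue, pref ++ suf) =
      (match pick e P' suf with
       | none => (ans, ue, pref ++ suf)
       | some (len, suf') => (ans + len, ue.set ei true, pref ++ suf'))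
  | [], suf, s, pref, ans, ue, hp, hs, hei, hue => by
    have : suf = [] := List.length_eq_zero_iff.mp (by simpa using hs)
    subst this
    simp [PySem.List.enumerate, pick]
  | p :: P', suf, s, pref, ans, ue, hp, hs, hei, hue => by
    rcases suf with _ | ⟨b, suf⟩
    · simp at hs
    · rw [PySem.List.enumerate_cons, List.foldl_cons]
      have hgb : PySem.List.pyGetD (pref ++ b :: suf) (s : Int) false = b := by
        rw [PySem.List.pyGetD_natCast, ← hp, getD_append_cons]
      have hge : PySem.List.pyGetD ue (ei : Int) false = false := by
        rw [PySem.List.pyGetD_natCast, hue]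
      by_cases hb : (!b && try4 4 p e) = true
      · -- match at the head
        obtain ⟨hb1, hb2⟩ := Bool.and_eq_true_iff.mp hb
        have hstep : innerStep e (ei : Int) (ans, ue, pref ++ b :: suf) ((s : Int), p)
            = (ans + (p.length : Int), ue.set ei true, pref ++ true :: suf) := by
          simp only [innerStep, hgb, hge, hb1, hb2, Bool.not_false, Bool.and_true,
            if_true]
          simp only [PySem.List.pySetD_natCast, ← hp, set_append_cons]
        rw [hstep]
        rw [inner_noop e (ei : Int) _ _ (by
          show PySem.List.pyGetD (ue.set ei true) (ei : Int) false = true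
          rw [PySem.List.pyGetD_natCast, getD_set_self _ _ _ _ hei])]
        simp [pick, hb]
      · -- no match at the head
        have hstep : innerStep e (ei : Int) (ans, ue, pref ++ b :: suf) ((s : Int), p)
            = (ans, ue, pref ++ b :: suf) := by
          unfold innerStep
          simp only [hgb, hge]
          rcases hb' : b with _ | _
          · rw [hb'] at hb
            simp only [Bool.not_false, Bool.true_and] at hb
            have : try4 4 p e = false := by simpa using hb
            simp [this]
          · simp
        rw [hstep]
        have hregroup : pref ++ b :: suf = (pref ++ [b]) ++ suf := by simp
        have hcast : (s : Int) + 1 = ((s + 1 : Nat) : Int) := by push_cast; ring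
        rw [hregroup, hcast]
        rw [inner_char e ei P' suf (s+1) (pref ++ [b]) ans ue (by simp [hp]) (by simpa using hs) hei hue]
        simp only [pick, if_neg hb]
        rcases hrec : pick e P' suf with _ | ⟨len2, u2⟩ <;> simp

theorem buildCS_split (P : List (List (Int × Int))) :
    buildCS P = (P.foldl (fun d p => d.insert (canon p) (d.getD (canon p) 0 + 1)) PySem.Dict.empty,
                 P.foldl (fun d p => d.insert (canon p) ((p.length : Int))) PySem.Dict.empty) := by
  unfold buildCS
  exact PySem.List.foldl_prod_mk
    (fun (d : PySem.Dict (List (Int × Int)) Int) (p : List (Int × Int)) =>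
      d.insert (canon p) (d.getD (canon p) 0 + 1))
    (fun (d : PySem.Dict (List (Int × Int)) Int) (p : List (Int × Int)) =>
      d.insert (canon p) ((p.length : Int))) P _ _

theorem buildCS_counts (P : List (List (Int × Int))) (k : List (Int × Int)) :
    (buildCS P).1.getD k 0 = ((P.map canon).count k : Int) := by
  rw [buildCS_split]
  dsimp only
  have h1 : (P.map canon).foldl
      (fun (d : PySem.Dict (List (Int × Int)) Int) x => d.insert x (d.getD x 0 + 1))
      PySem.Dict.empty
      = P.foldl (fun d p => d.insert (canon p) (d.getD (canon p) 0 + 1)) PySem.Dict.empty :=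
    List.foldl_map
  rw [← h1, PySem.Dict.getD_foldl_insert_add_one]
  simp

theorem sizes_untouched (k : List (Int × Int)) :
    ∀ (P : List (List (Int × Int))) (d : PySem.Dict (List (Int × Int)) Int),
    (∀ q ∈ P, canon q ≠ k) →
    (P.foldl (fun d p => d.insert (canon p) ((p.length : Int))) d).getD k 0 = d.getD k 0
  | [], d, _ => rfl
  | p :: P, d, h => by
    rw [List.foldl_cons, sizes_untouched k P _ (fun q hq => h q (by simp [hq]))]
    rw [PySem.Dict.getD_insert]
    rw [if_neg (fun hc => h p (by simp) hc.symm)]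

theorem sizes_getD :
    ∀ (P : List (List (Int × Int))) (d : PySem.Dict (List (Int × Int)) Int),
    ∀ p ∈ P, (P.foldl (fun d p => d.insert (canon p) ((p.length : Int))) d).getD (canon p) 0 = (p.length : Int)
  | [], _, p, hp => by simp at hp
  | q :: P, d, p, hp => by
    rw [List.foldl_cons]
    rcases List.mem_cons.mp hp with rfl | hmem
    · by_cases hex : ∃ r ∈ P, canon r = canon p
      · obtain ⟨r, hr, hrc⟩ := hex
        have := sizes_getD P (d.insert (canon p) ((p.length : Int))) r hr
        rw [hrc] at this
        rw [this]
        have := canon_length hrc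
        simp [this]
      · rw [not_exists] at hex
        simp only [not_and] at hex
        rw [sizes_untouched (canon p) P _ hex]
        rw [PySem.Dict.getD_insert, if_pos rfl]
    · exact sizes_getD P _ p hmem

theorem buildCS_sizes (P : List (List (Int × Int))) :
    ∀ p ∈ P, (buildCS P).2.getD (canon p) 0 = (p.length : Int) := by
  rw [buildCS_split]
  dsimp only
  exact sizes_getD P PySem.Dict.empty

theorem cnt_replicate :
    ∀ (P : List (List (Int × Int))) (k : List (Int × Int)),
    cnt P (List.replicate P.length false) k = (P.map canon).count k
  | [], k => rfl
  | p :: P, k => by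
    simp only [cnt, List.length_cons, List.replicate_succ, List.zip_cons_cons, List.countP_cons,
      List.map_cons]
    have := cnt_replicate P k
    simp only [cnt] at this
    rw [this]
    simp [List.count_cons, beq_iff_eq]

theorem outer_char (P : List (List (Int × Int))) (sizes : PySem.Dict (List (Int × Int)) Int)
    (hS : ∀ p ∈ P, sizes.getD (canon p) 0 = (p.length : Int)) :
    ∀ (E' : List (List (Int × Int))) (k : Nat) (prefE : List Bool) (ans : Int)
      (u : List Bool) (counts : PySem.Dict (List (Int × Int)) Int),
    prefE.length = k → u.length = P.length →
    (∀ key, counts.getD key 0 = (cnt P u key : Int)) →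
    ((PySem.List.enumerate E' (k : Int)).foldl (fun st ep => innerLoop ep.2 ep.1 P st)
        (ans, prefE ++ List.replicate E'.length false, u)).1
      = (E'.foldl (bStep sizes) (ans, counts)).1 := by
  intro E'
  induction E' with
  | nil => intro k prefE ans u counts _ _ _; simp [PySem.List.enumerate]
  | cons e E'' ih =>
    intro k prefE ans u counts hpk hu hrel
    rw [PySem.List.enumerate_cons, List.foldl_cons, List.foldl_cons]
    have hilp : innerLoop e (k : Int) P
        (ans, prefE ++ List.replicate (e :: E'').length false, u) =
        (match pick e P u with
         | none => (ans, prefE ++ List.replicate (e :: E'').length false, u)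
         | some (len, suf') => (ans + len,
             (prefE ++ List.replicate (e :: E'').length false).set k true, ([] : List Bool) ++ suf')) := by
      unfold innerLoop
      have := inner_char e k P u 0 [] ans (prefE ++ List.replicate (e :: E'').length false)
        rfl hu (by simp [List.length_replicate]; omega) (by
          simp only [List.length_cons, List.replicate_succ]
          rw [← hpk, getD_append_cons])
      simpa using this
    rcases hpick : pick e P u with _ | ⟨len, u'⟩
    · rw [hpick] at hilp
      simp only at hilp
      rw [hilp]
      have hcnt0 : cnt P u (canon e) = 0 := (pick_none_iff e P u hu).mp hpick
      have hb : bStep sizes (ans, counts) e = (ans, counts) := by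
        unfold bStep
        have : counts.getD (canon e) 0 = 0 := by rw [hrel]; simp [hcnt0]
        simp [this]
      rw [hb]
      have hre : prefE ++ List.replicate (e :: E'').length false
          = (prefE ++ [false]) ++ List.replicate E''.length false := by
        simp [List.replicate_succ]
      rw [hre]
      have hcast : (k : Int) + 1 = ((k + 1 : Nat) : Int) := by push_cast; ring
      rw [hcast]
      exact ih (k+1) (prefE ++ [false]) ans u counts (by simp [hpk]) hu hrel
    · rw [hpick] at hilp
      simp only at hilp
      rw [hilp]
      obtain ⟨hlen_u, ⟨p, hpP, hpe, hplen⟩, hc1, hc2⟩ := pick_some e P u len u' hu hpick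
      have hcntpos : counts.getD (canon e) 0 = (cnt P u' (canon e) : Int) + 1 := by
        rw [hrel, hc1]; push_cast; ring
      have hb : bStep sizes (ans, counts) e
          = (ans + len, counts.insert (canon e) (counts.getD (canon e) 0 - 1)) := by
        unfold bStep
        rw [if_pos (by rw [hcntpos]; omega)]
        have : sizes.getD (canon e) 0 = len := by
          rw [← hpe, hS p hpP, hplen]
        rw [this]
      rw [hb]
      have hset : (prefE ++ List.replicate (e :: E'').length false).set k true
          = (prefE ++ [true]) ++ List.replicate E''.length false := by
        simp only [List.length_cons, List.replicate_succ]
        rw [← hpk, set_append_cons]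
        simp
      rw [hset]
      have hcast : (k : Int) + 1 = ((k + 1 : Nat) : Int) := by push_cast; ring
      rw [hcast]
      refine ih (k+1) (prefE ++ [true]) (ans + len) u'
        (counts.insert (canon e) (counts.getD (canon e) 0 - 1)) (by simp [hpk])
        (by rw [hlen_u, hu]) ?_
      intro key
      rw [PySem.Dict.getD_insert]
      by_cases hkey : key = canon e
      · rw [if_pos hkey, hkey, hcntpos]; ring
      · rw [if_neg hkey, hrel, hc2 key hkey]

theorem ports_agree (gb tbl : List (List Int)) : solution gb tbl = solution_alt gb tbl := by
  unfold solution solution_alt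
  dsimp only
  have hmape : (collect gb 0 (gb.length : Int)).map (fun _ => false)
      = List.replicate (collect gb 0 (gb.length : Int)).length false := by
    simp [List.map_const']
  have hmapp : (collect tbl 1 (gb.length : Int)).map (fun _ => false)
      = List.replicate (collect tbl 1 (gb.length : Int)).length false := by
    simp [List.map_const']
  rw [hmape, hmapp]
  have h := outer_char (collect tbl 1 (gb.length : Int)) (buildCS (collect tbl 1 (gb.length : Int))).2
    (buildCS_sizes _)
    (collect gb 0 (gb.length : Int)) 0 [] 0
    (List.replicate (collect tbl 1 (gb.length : Int)).length false)
    (buildCS (collect tbl 1 (gb.length : Int))).1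
    rfl (by simp)
    (by intro key; rw [buildCS_counts, cnt_replicate])
  simpa using h

-- ===== VERDICT (by name: the statement is the Claim_ definition above) =====
theorem solution_spec : Claim_equal_solution := by
  intro game_board table _ _
  unfold Spec_solution
  exact ports_agree game_board table
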